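-- pv_equiv track=rewrite | github.com/hemanthsai-d/Industry_Agnostic_Decision_System | scripts/promote_canary.py | _previous_stage
-- ===== SOURCE A (Python) =====
-- STAGES = [0, 5, 25, 50, 100]
--
-- def _previous_stage(current_percent: int) -> int:
--     safe_current = max(0, min(100, int(current_percent)))
--     prev = 0
--     for stage in STAGES:
--         if stage >= safe_current:
--             return prev
--         prev = stage
--     return prev
-- ===== SOURCE B (Python) =====
-- import bisect
--
-- STAGES = [0, 5, 25, 50, 100]
--
-- def _previous_stage(current_percent: int) -> int:
--     safe_current = max(0, min(100, int(current_percent)))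
--     idx = bisect.bisect_left(STAGES, safe_current)
--     return STAGES[idx - 1] if idx > 0 else 0
-- ===== Notes on version B (the rewrite author's own statement) =====
-- stated objective: idiomatic
-- what changed: Replaces the linear early-return scan over STAGES with a single bisect.bisect_left binary search, keeping the identical clamp.
import Mathlib
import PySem

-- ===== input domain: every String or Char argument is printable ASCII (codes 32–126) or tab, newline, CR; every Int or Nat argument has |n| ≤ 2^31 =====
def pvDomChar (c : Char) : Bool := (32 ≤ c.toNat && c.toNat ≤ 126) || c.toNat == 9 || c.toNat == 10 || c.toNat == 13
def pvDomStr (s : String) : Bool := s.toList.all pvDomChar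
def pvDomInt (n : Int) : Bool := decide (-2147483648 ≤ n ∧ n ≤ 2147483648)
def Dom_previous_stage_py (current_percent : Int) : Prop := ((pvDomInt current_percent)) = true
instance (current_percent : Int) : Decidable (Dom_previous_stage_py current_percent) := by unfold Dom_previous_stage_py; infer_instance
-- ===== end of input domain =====

-- B replaces A's linear early-return scan with a bisect_left binary search over the sorted STAGES constant (idiomatic; same clamp).


-- ===== PORT A =====
def pvSTAGES : List Int := [0, 5, 25, 50, 100]

-- the for-loop with early return: returns prev at the first stage ≥ safe_current
def pvPrevLoop (safe : Int) (prev : Int) : List Int → Int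
  | [] => prev
  | stage :: rest => if stage ≥ safe then prev else pvPrevLoop safe stage rest

def previous_stage_py (current_percent : Int) : Int :=
  let safe_current := max 0 (min 100 current_percent)
  pvPrevLoop safe_current 0 pvSTAGES

-- ===== PORT B =====
-- bisect.bisect_left: the while lo < hi loop, with fuel making it total (fuel = len+1 suffices here)
def pvBisectLeftGo (xs : List Int) (x : Int) : Nat → Nat → Nat → Nat
  | 0, lo, _ => lo
  | fuel + 1, lo, hi =>
      if lo < hi then
        let mid := (lo + hi) / 2
        if xs.getD mid 0 < x then pvBisectLeftGo xs x fuel (mid + 1) hi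
        else pvBisectLeftGo xs x fuel lo mid
      else lo

def pvBisectLeft (xs : List Int) (x : Int) : Nat :=
  pvBisectLeftGo xs x (xs.length + 1) 0 xs.length

def previous_stage_py_alt (current_percent : Int) : Int :=
  let safe_current := max 0 (min 100 current_percent)
  let idx := pvBisectLeft pvSTAGES safe_current
  if idx > 0 then pvSTAGES.getD (idx - 1) 0 else 0

-- ===== PRECONDITION & SPEC =====
def Spec_previous_stage_py (current_percent : Int) (out : Int) : Prop := out = previous_stage_py_alt current_percent
instance (current_percent : Int) (out : Int) : Decidable (Spec_previous_stage_py current_percent out) := by unfold Spec_previous_stage_py; infer_instance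

-- ===== CLAIM (what is proved, stated in full; the proofs are below) =====
def Claim_equal_previous_stage_py : Prop := ∀ (current_percent : Int), Dom_previous_stage_py current_percent → Spec_previous_stage_py current_percent (previous_stage_py current_percent)

-- ===== LEMMAS AND PROOFS =====
-- Both programs depend only on the clamped value, which lies in [0, 100]: check all 101 cases.
theorem pv_core_eq : ∀ s ∈ Finset.Icc (0 : Int) 100,
    pvPrevLoop s 0 pvSTAGES =
      (let idx := pvBisectLeft pvSTAGES s
       if idx > 0 then pvSTAGES.getD (idx - 1) 0 else 0) := by decide

-- ===== VERDICT (by name: the statement is the Claim_ definition above) =====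
theorem previous_stage_py_spec : Claim_equal_previous_stage_py := by
  intro n _
  unfold Spec_previous_stage_py previous_stage_py previous_stage_py_alt
  exact pv_core_eq _ (by rw [Finset.mem_Icc]; omega)
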